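-- pv_equiv track=rewrite | github.com/christoffersire/nm-ai-2026-ngd | data/scripts/tiling.py | generate_tile_coords
-- ===== SOURCE A (Python) =====
-- def generate_tile_coords(img_w, img_h, tile_size, stride):
--     """
--     Generate tile (x, y) origins for an image.
--
--     Includes edge-anchored tiles to ensure full right/bottom coverage.
--     Deduplicates if edge tile overlaps with grid tile.
--
--     Returns list of (x, y) tuples.
--     """
--     tiles = set()
--
--     # Regular grid
--     for y in range(0, img_h - tile_size + 1, stride):
--         for x in range(0, img_w - tile_size + 1, stride):
--             tiles.add((x, y))
--
--     # Right-edge anchored column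
--     if img_w > tile_size:
--         right_x = img_w - tile_size
--         for y in range(0, img_h - tile_size + 1, stride):
--             tiles.add((right_x, y))
--
--     # Bottom-edge anchored row
--     if img_h > tile_size:
--         bottom_y = img_h - tile_size
--         for x in range(0, img_w - tile_size + 1, stride):
--             tiles.add((x, bottom_y))
--
--     # Bottom-right corner
--     if img_w > tile_size and img_h > tile_size:
--         tiles.add((img_w - tile_size, img_h - tile_size))
--
--     # Handle images smaller than tile_size
--     if img_w <= tile_size or img_h <= tile_size:
--         tiles.add((0, 0))
--
--     return sorted(tiles)
-- ===== SOURCE B (Python) =====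
-- def generate_tile_coords(img_w, img_h, tile_size, stride):
--     """Same result via two 1-D origin sets combined as a product, plus the (0,0) fallback."""
--     xs = set(range(0, img_w - tile_size + 1, stride))
--     if img_w > tile_size:
--         xs.add(img_w - tile_size)
--     ys = set(range(0, img_h - tile_size + 1, stride))
--     if img_h > tile_size:
--         ys.add(img_h - tile_size)
--     tiles = {(x, y) for x in xs for y in ys}
--     if img_w <= tile_size or img_h <= tile_size:
--         tiles.add((0, 0))
--     return sorted(tiles)
-- ===== Notes on version B (the rewrite author's own statement) =====
-- stated objective: simpler
-- what changed: Replaces the four separate grid/right-edge/bottom-edge/corner loops over pairs with two 1-D origin sets (grid range plus the edge anchor each) combined by a cartesian product, then the same (0,0) fallback and sort.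
import Mathlib
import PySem

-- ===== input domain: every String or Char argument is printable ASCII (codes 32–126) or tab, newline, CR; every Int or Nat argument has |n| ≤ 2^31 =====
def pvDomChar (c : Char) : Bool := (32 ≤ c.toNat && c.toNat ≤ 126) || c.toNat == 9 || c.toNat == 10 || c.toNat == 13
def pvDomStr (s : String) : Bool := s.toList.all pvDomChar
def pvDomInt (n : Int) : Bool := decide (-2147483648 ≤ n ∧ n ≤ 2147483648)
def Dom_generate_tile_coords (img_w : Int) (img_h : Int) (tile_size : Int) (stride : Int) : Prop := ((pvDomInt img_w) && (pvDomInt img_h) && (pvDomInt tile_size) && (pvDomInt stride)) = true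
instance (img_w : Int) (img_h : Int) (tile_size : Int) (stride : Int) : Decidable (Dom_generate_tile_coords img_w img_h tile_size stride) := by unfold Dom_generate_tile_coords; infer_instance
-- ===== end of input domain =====

-- B replaces A's four grid/right-edge/bottom-edge/corner loops by two 1-D origin sets combined
-- as a cartesian product (objective: simpler decomposition, same cost); equivalence proved on stride ≠ 0.

-- ===== PORT A =====
def generate_tile_coords (img_w : Int) (img_h : Int) (tile_size : Int) (stride : Int) : List (Int × Int) :=
  -- tiles = set()
  let tiles : PySem.Set (Int × Int) := PySem.Set.empty
  -- regular grid: for y in range(...): for x in range(...): tiles.add((x, y))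
  let tiles := (PySem.List.pyRange 0 (img_h - tile_size + 1) stride).foldl
      (fun t y => (PySem.List.pyRange 0 (img_w - tile_size + 1) stride).foldl
        (fun t x => PySem.Set.add t (x, y)) t) tiles
  -- right-edge anchored column
  let tiles := if img_w > tile_size then
      (PySem.List.pyRange 0 (img_h - tile_size + 1) stride).foldl
        (fun t y => PySem.Set.add t (img_w - tile_size, y)) tiles
    else tiles
  -- bottom-edge anchored row
  let tiles := if img_h > tile_size then
      (PySem.List.pyRange 0 (img_w - tile_size + 1) stride).foldl
        (fun t x => PySem.Set.add t (x, img_h - tile_size)) tiles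
    else tiles
  -- bottom-right corner
  let tiles := if img_w > tile_size ∧ img_h > tile_size then
      PySem.Set.add tiles (img_w - tile_size, img_h - tile_size)
    else tiles
  -- images smaller than tile_size
  let tiles := if img_w ≤ tile_size ∨ img_h ≤ tile_size then PySem.Set.add tiles (0, 0) else tiles
  PySem.List.sorted2 tiles Prod.fst Prod.snd

-- ===== PORT B =====
def generate_tile_coords_alt (img_w : Int) (img_h : Int) (tile_size : Int) (stride : Int) : List (Int × Int) :=
  -- xs = set(range(0, img_w - tile_size + 1, stride)); if img_w > tile_size: xs.add(img_w - tile_size)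
  let xs : PySem.Set Int := PySem.Set.ofList (PySem.List.pyRange 0 (img_w - tile_size + 1) stride)
  let xs := if img_w > tile_size then PySem.Set.add xs (img_w - tile_size) else xs
  -- ys symmetrically
  let ys : PySem.Set Int := PySem.Set.ofList (PySem.List.pyRange 0 (img_h - tile_size + 1) stride)
  let ys := if img_h > tile_size then PySem.Set.add ys (img_h - tile_size) else ys
  -- tiles = {(x, y) for x in xs for y in ys}
  let tiles : PySem.Set (Int × Int) := xs.foldl
      (fun t x => ys.foldl (fun t y => PySem.Set.add t (x, y)) t) PySem.Set.empty
  -- fallback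
  let tiles := if img_w ≤ tile_size ∨ img_h ≤ tile_size then PySem.Set.add tiles (0, 0) else tiles
  PySem.List.sorted2 tiles Prod.fst Prod.snd

-- ===== PRECONDITION & SPEC =====
-- Pre_ excludes exactly stride = 0, on which Python's range(..., 0) raises ValueError.
def Pre_generate_tile_coords (img_w : Int) (img_h : Int) (tile_size : Int) (stride : Int) : Prop := stride ≠ 0
instance (img_w : Int) (img_h : Int) (tile_size : Int) (stride : Int) : Decidable (Pre_generate_tile_coords img_w img_h tile_size stride) := by unfold Pre_generate_tile_coords; infer_instance
def pvWitness_generate_tile_coords : Int × Int × Int × Int := (10, 8, 4, 3)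

def Spec_generate_tile_coords (img_w : Int) (img_h : Int) (tile_size : Int) (stride : Int) (out : List (Int × Int)) : Prop := out = generate_tile_coords_alt img_w img_h tile_size stride
instance (img_w : Int) (img_h : Int) (tile_size : Int) (stride : Int) (out : List (Int × Int)) : Decidable (Spec_generate_tile_coords img_w img_h tile_size stride out) := by unfold Spec_generate_tile_coords; infer_instance

-- ===== CLAIM (what is proved, stated in full; the proofs are below) =====
def Claim_equal_generate_tile_coords : Prop := ∀ (img_w : Int) (img_h : Int) (tile_size : Int) (stride : Int), Dom_generate_tile_coords img_w img_h tile_size stride → Pre_generate_tile_coords img_w img_h tile_size stride → Spec_generate_tile_coords img_w img_h tile_size stride (generate_tile_coords img_w img_h tile_size stride)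

-- ===== LEMMAS AND PROOFS =====

-- the (nonstrict) lexicographic order Python uses to sort pairs of ints
def pvLexLe (a b : Int × Int) : Prop := a.1 < b.1 ∨ (a.1 = b.1 ∧ a.2 ≤ b.2)

theorem pv_insertBy_pairwise {α : Type} (le : α → α → Prop) (before : α → α → Bool)
    (h1 : ∀ a b, before a b = true → le a b) (h2 : ∀ a b, before a b = false → le b a)
    (htr : ∀ a b c, le a b → le b c → le a c)
    (x : α) (acc : List α) (h : acc.Pairwise le) :
    (PySem.List.insertBy before x acc).Pairwise le := by
  induction acc with
  | nil => simp [PySem.List.insertBy]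
  | cons y ys ih =>
    rw [List.pairwise_cons] at h
    by_cases hb : before x y = true
    · simp only [PySem.List.insertBy, hb, if_true]
      refine List.Pairwise.cons ?_ (List.Pairwise.cons h.1 h.2)
      intro z hz
      rcases List.mem_cons.mp hz with rfl | hz
      · exact h1 _ _ hb
      · exact htr _ _ _ (h1 _ _ hb) (h.1 _ hz)
    · simp only [PySem.List.insertBy, hb, if_false]
      refine List.Pairwise.cons ?_ (ih h.2)
      intro z hz
      rcases (PySem.List.mem_insertBy _ _ _ _).mp hz with rfl | hz
      · exact h2 _ _ (Bool.eq_false_iff.mpr hb)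
      · exact h.1 _ hz

theorem pv_foldl_insertBy_pairwise {α : Type} (le : α → α → Prop) (before : α → α → Bool)
    (h1 : ∀ a b, before a b = true → le a b) (h2 : ∀ a b, before a b = false → le b a)
    (htr : ∀ a b c, le a b → le b c → le a c)
    (xs : List α) (acc : List α) (h : acc.Pairwise le) :
    (xs.foldl (fun acc x => PySem.List.insertBy before x acc) acc).Pairwise le := by
  induction xs generalizing acc with
  | nil => exact h
  | cons x xs ih => exact ih _ (pv_insertBy_pairwise le before h1 h2 htr x acc h)

theorem pv_sorted2_pairwise (S : List (Int × Int)) :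
    (PySem.List.sorted2 S Prod.fst Prod.snd).Pairwise pvLexLe := by
  show (S.foldl (fun acc x => PySem.List.insertBy
      (fun a b => decide (a.1 < b.1) || (!decide (b.1 < a.1) && decide (a.2 < b.2))) x acc) []).Pairwise pvLexLe
  apply pv_foldl_insertBy_pairwise
  · intro a b hab
    simp only [Bool.or_eq_true, Bool.and_eq_true, Bool.not_eq_true', decide_eq_true_eq,
      decide_eq_false_iff_not] at hab
    unfold pvLexLe; omega
  · intro a b hab
    simp only [Bool.or_eq_false_iff, Bool.and_eq_false_iff, Bool.not_eq_false', decide_eq_true_eq,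
      decide_eq_false_iff_not] at hab
    unfold pvLexLe; omega
  · intro a b c h1 h2; unfold pvLexLe at *; omega
  · exact List.Pairwise.nil

theorem pv_sorted2_ext (S T : List (Int × Int)) (hS : S.Nodup) (hT : T.Nodup)
    (h : ∀ a, a ∈ S ↔ a ∈ T) :
    PySem.List.sorted2 S Prod.fst Prod.snd = PySem.List.sorted2 T Prod.fst Prod.snd := by
  apply List.eq_of_perm_of_sorted (le := pvLexLe)
  · intro a b _ _ hab hba; unfold pvLexLe at *
    obtain ⟨a1, a2⟩ := a; obtain ⟨b1, b2⟩ := b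
    simp_all; omega
  · exact pv_sorted2_pairwise S
  · exact pv_sorted2_pairwise T
  · exact (PySem.List.sorted2_perm S _ _ _).trans
      (((List.perm_ext_iff_of_nodup hS hT).mpr h).trans (PySem.List.sorted2_perm T _ _ _).symm)

theorem pv_nodup_foldl_add {α β : Type} [BEq α] [LawfulBEq α] (l : List β) (f : β → α)
    (t : PySem.Set α) (h : t.Nodup) : (l.foldl (fun t b => PySem.Set.add t (f b)) t).Nodup := by
  rw [← PySem.Set.update_map_eq_foldl_add]
  exact PySem.Set.nodup_update _ _ h

theorem pv_nodup_foldl_add2 {α β γ : Type} [BEq α] [LawfulBEq α] (l₁ : List β) (l₂ : List γ)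
    (f : β → γ → α) (t : PySem.Set α) (h : t.Nodup) :
    (l₁.foldl (fun t b => l₂.foldl (fun t c => PySem.Set.add t (f b c)) t) t).Nodup := by
  induction l₁ generalizing t with
  | nil => exact h
  | cons b l₁ ih => exact ih _ (pv_nodup_foldl_add l₂ (f b) t h)

theorem pv_mem_foldl_add2 {α β γ : Type} [BEq α] [LawfulBEq α] (l₁ : List β) (l₂ : List γ)
    (f : β → γ → α) (t : PySem.Set α) (a : α) :
    a ∈ l₁.foldl (fun t b => l₂.foldl (fun t c => PySem.Set.add t (f b c)) t) t ↔
      a ∈ t ∨ ∃ b ∈ l₁, ∃ c ∈ l₂, a = f b c := by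
  induction l₁ generalizing t with
  | nil => simp
  | cons b l₁ ih =>
    simp only [List.foldl_cons, ih, PySem.Set.mem_foldl_add, List.mem_cons]
    constructor
    · rintro (⟨h | ⟨c, hc, rfl⟩⟩ | ⟨b', hb', c, hc, rfl⟩)
      · exact Or.inl h
      · exact Or.inr ⟨b, Or.inl rfl, c, hc, rfl⟩
      · exact Or.inr ⟨b', Or.inr hb', c, hc, rfl⟩
    · rintro (h | ⟨b', rfl | hb', c, hc, rfl⟩)
      · exact Or.inl (Or.inl h)
      · exact Or.inl (Or.inr ⟨c, hc, rfl⟩)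
      · exact Or.inr ⟨b', hb', c, hc, rfl⟩

-- ===== VERDICT (by name: the statement is the Claim_ definition above) =====
theorem generate_tile_coords_spec : Claim_equal_generate_tile_coords := by
  intro W H ts st _ _
  unfold Spec_generate_tile_coords generate_tile_coords generate_tile_coords_alt
  apply pv_sorted2_ext
  · -- A's set is duplicate-free
    split_ifs <;>
      (repeat first
        | apply PySem.Set.nodup_add
        | apply pv_nodup_foldl_add
        | apply pv_nodup_foldl_add2) <;>
      exact List.nodup_nil
  · -- B's set is duplicate-free
    split_ifs <;>
      (repeat first
        | apply PySem.Set.nodup_add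
        | apply pv_nodup_foldl_add2) <;>
      exact List.nodup_nil
  · -- same members
    rintro ⟨x, y⟩
    by_cases hW : ts < W <;> by_cases hH : ts < H <;>
      have hW' := hW <;> have hH' := hH <;>
      simp only [hW, hH, if_pos, if_neg, gt_iff_lt, and_true, and_false, true_and, false_and,
        if_true, if_false, and_self, not_true_eq_false, not_false_eq_true] <;>
      simp [pv_mem_foldl_add2, PySem.Set.mem_foldl_add, PySem.Set.mem_add, PySem.Set.mem_ofList,
        PySem.Set.empty, Prod.mk.injEq, show (ts < W ∧ ts < H) ↔ (ts < W ∧ ts < H) from Iff.rfl,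
        hW, hH, show (W ≤ ts ∨ H ≤ ts) ↔ ¬(ts < W) ∨ ¬(ts < H) by omega] <;>
      tauto
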